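-- pv_equiv track=rewrite | github.com/hashemimostafa/Think-Python-2nd-Edition-Questions-and-Solutions | 9.3-part2.py | avoids
-- ===== SOURCE A (Python) =====
-- def avoids(word, forbidden_letters):
--     avoid_letters = ''
--
--     for l in forbidden_letters:
--         if l not in avoid_letters:
--             avoid_letters += l
--
--     for ch in word:
--         if ch in avoid_letters:
--             return False
--     return True
-- ===== SOURCE B (Python) =====
-- def avoids(word, forbidden_letters):
--     # Delete every forbidden letter from the word; nothing was deleted
--     # exactly when the word avoids all forbidden letters.
--     return len(word.translate(str.maketrans('', '', forbidden_letters))) == len(word)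
-- ===== Notes on version B (the rewrite author's own statement) =====
-- stated objective: alternative
-- what changed: Instead of dedup-then-scan with an early-return membership test, B deletes the forbidden letters from the word with str.translate and decides avoidance by comparing the surviving length with the original length.
import Mathlib
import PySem

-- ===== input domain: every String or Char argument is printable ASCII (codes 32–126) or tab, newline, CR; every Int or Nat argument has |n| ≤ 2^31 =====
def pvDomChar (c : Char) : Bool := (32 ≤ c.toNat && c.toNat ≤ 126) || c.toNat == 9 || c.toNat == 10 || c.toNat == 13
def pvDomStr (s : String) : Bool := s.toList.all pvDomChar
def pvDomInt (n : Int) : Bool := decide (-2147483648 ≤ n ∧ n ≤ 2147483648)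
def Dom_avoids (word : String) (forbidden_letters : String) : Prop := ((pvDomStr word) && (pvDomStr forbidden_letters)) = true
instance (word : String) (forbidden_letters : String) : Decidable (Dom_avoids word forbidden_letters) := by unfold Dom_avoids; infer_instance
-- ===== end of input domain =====

-- B deletes the forbidden letters from the word (str.translate with a deletion table)
-- and compares lengths, instead of A's dedup loop + early-return character scan.
-- ===== PORT A =====
-- A's second loop: return False on the first character found in avoid_letters, else True
def avoidsScan (word : List Char) (avoid_letters : List Char) : Bool :=
  match word with
  | [] => true
  | ch :: rest => if avoid_letters.contains ch then false else avoidsScan rest avoid_letters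

def avoids (word : String) (forbidden_letters : String) : Bool :=
  let avoid_letters := forbidden_letters.toList.foldl
    (fun acc l => if acc.contains l then acc else acc ++ [l]) []
  avoidsScan word.toList avoid_letters

-- ===== PORT B =====
-- str.maketrans('', '', forbidden_letters) builds a deletion table whose keys are
-- exactly the characters of forbidden_letters; word.translate(table) keeps exactly
-- the characters NOT in the table (exact hand port: filter by non-membership);
-- len(...) == len(word) is the final length comparison.
def avoids_alt (word : String) (forbidden_letters : String) : Bool :=
  let table := forbidden_letters.toList
  let translated := word.toList.filter (fun c => !table.contains c)
  translated.length == word.toList.length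

-- ===== PRECONDITION & SPEC =====
def Spec_avoids (word : String) (forbidden_letters : String) (out : Bool) : Prop := out = avoids_alt word forbidden_letters
instance (word : String) (forbidden_letters : String) (out : Bool) : Decidable (Spec_avoids word forbidden_letters out) := by unfold Spec_avoids; infer_instance

-- ===== CLAIM (what is proved, stated in full; the proofs are below) =====
def Claim_equal_avoids : Prop := ∀ (word : String) (forbidden_letters : String), Dom_avoids word forbidden_letters → Spec_avoids word forbidden_letters (avoids word forbidden_letters)

-- ===== LEMMAS AND PROOFS =====
-- A's first loop builds exactly PySem.Set.ofList of the forbidden letters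
theorem avoids_build_eq_ofList (f : List Char) :
    f.foldl (fun acc l => if acc.contains l then acc else acc ++ [l]) [] =
      PySem.Set.ofList f := rfl

-- A's scan over the dedup of f agrees with B's count of the survivors of filtering by f:
-- the scan returns false iff some character of w lies in f iff filtering by f shortens w.
theorem avoidsScan_eq_filter_len (w f : List Char) :
    avoidsScan w (PySem.Set.ofList f) =
      ((w.filter (fun c => !f.contains c)).length == w.length) := by
  induction w with
  | nil => rfl
  | cons ch rest ih =>
    have hmem : List.contains (PySem.Set.ofList f) ch = f.contains ch := by
      rw [Bool.eq_iff_iff]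
      simp only [List.contains_iff_mem]
      exact PySem.Set.mem_ofList f ch
    rw [avoidsScan, hmem, List.filter_cons]
    cases hc : f.contains ch with
    | true =>
      have hle := List.length_filter_le (fun c => !decide (c ∈ f)) rest
      simp
      omega
    | false =>
      rw [ih]
      simp

-- ===== VERDICT (by name: the statement is the Claim_ definition above) =====
theorem avoids_spec : Claim_equal_avoids := by
  intro word forbidden_letters _
  unfold Spec_avoids avoids avoids_alt
  rw [avoids_build_eq_ofList, avoidsScan_eq_filter_len]
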